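-- pv_equiv track=rewrite | github.com/TobiasWienand/TypeFuzz | instrument_v8.py | find_semicolon_line
-- ===== SOURCE A (Python) =====
-- def strip_line_comment(line):
--     in_str = None
--     i = 0
--     while i < len(line):
--         c = line[i]
--         if in_str:
--             if c == "\\" and i + 1 < len(line):
--                 i += 2
--                 continue
--             if c == in_str:
--                 in_str = None
--         else:
--             if c in ('"', "'"):
--                 in_str = c
--             elif c == "/" and i + 1 < len(line) and line[i + 1] == "/":
--                 return line[:i]
--         i += 1
--     return line
--
-- def find_semicolon_line(lines, start_line):
--     paren_depth = 0
--     brace_depth = 0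
--     for i in range(start_line, min(start_line + 30, len(lines))):
--         code = strip_line_comment(lines[i])
--         for c in code:
--             if c == "(":
--                 paren_depth += 1
--             elif c == ")":
--                 paren_depth -= 1
--             elif c == "{":
--                 brace_depth += 1
--             elif c == "}":
--                 brace_depth -= 1
--             elif c == ";" and paren_depth <= 0 and brace_depth <= 0:
--                 return i
--     return start_line
-- ===== SOURCE B (Python) =====
-- def find_semicolon_line(lines, start_line):
--     paren_depth = 0
--     brace_depth = 0
--     for i in range(start_line, min(start_line + 30, len(lines))):
--         line = lines[i]
--         in_str = None
--         skip = False
--         for j, c in enumerate(line):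
--             if in_str is None and c == "/" and j + 1 < len(line) and line[j + 1] == "/":
--                 break
--             if c == "(":
--                 paren_depth += 1
--             elif c == ")":
--                 paren_depth -= 1
--             elif c == "{":
--                 brace_depth += 1
--             elif c == "}":
--                 brace_depth -= 1
--             elif c == ";" and paren_depth <= 0 and brace_depth <= 0:
--                 return i
--             if skip:
--                 skip = False
--             elif in_str is not None:
--                 if c == "\\" and j + 1 < len(line):
--                     skip = True
--                 elif c == in_str:
--                     in_str = None
--             elif c in ('"', "'"):
--                 in_str = c
--     return start_line
-- ===== Notes on version B (the rewrite author's own statement) =====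
-- stated objective: simpler
-- what changed: Replaced A's two passes per line (a strip_line_comment helper building a stripped copy of the line, then a bracket-depth scan over that copy) by one fused left-to-right scan per line that carries the string/escape state and the depths together and stops at a top-level '//', allocating no intermediate string.
import Mathlib
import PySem

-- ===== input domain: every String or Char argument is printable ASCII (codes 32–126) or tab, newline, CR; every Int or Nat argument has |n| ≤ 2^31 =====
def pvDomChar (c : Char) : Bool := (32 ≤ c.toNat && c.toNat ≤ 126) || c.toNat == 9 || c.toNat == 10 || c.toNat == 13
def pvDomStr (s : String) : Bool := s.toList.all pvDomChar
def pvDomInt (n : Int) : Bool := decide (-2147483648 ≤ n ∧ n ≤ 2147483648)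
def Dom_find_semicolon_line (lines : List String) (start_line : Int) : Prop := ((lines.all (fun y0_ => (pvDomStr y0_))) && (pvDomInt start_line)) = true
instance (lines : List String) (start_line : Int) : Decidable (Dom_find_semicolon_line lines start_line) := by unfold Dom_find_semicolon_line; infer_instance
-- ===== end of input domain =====

-- B fuses A's two passes per line (strip_line_comment helper + depth scan) into one
-- scan per line carrying the string/escape state together with the depths (objective: simpler).


-- ===== PORT A =====
-- strip_line_comment: the index-based while loop becomes structural recursion on the char list
-- (i += 2 = consuming two chars); returns the kept prefix (line[:i] at the '//', else the whole line).
def stripLineComment : List Char → Option Char → List Char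
  | [], _ => []
  | c :: rest, some q =>
      if c = '\\' ∧ rest ≠ [] then
        c :: rest.head! :: stripLineComment rest.tail (some q)
      else if c = q then c :: stripLineComment rest none
      else c :: stripLineComment rest (some q)
  | c :: rest, none =>
      if c = '"' ∨ c = '\'' then c :: stripLineComment rest (some c)
      else if c = '/' ∧ rest.head? = some '/' then []
      else c :: stripLineComment rest none
termination_by cs _ => cs.length
decreasing_by
  all_goals simp [List.length_tail]

-- one character of A's inner for-loop: `none` = semicolon found (early return)
def depthStep (c : Char) (pd bd : Int) : Option (Int × Int) :=
  if c = '(' then some (pd + 1, bd)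
  else if c = ')' then some (pd - 1, bd)
  else if c = '{' then some (pd, bd + 1)
  else if c = '}' then some (pd, bd - 1)
  else if c = ';' ∧ pd ≤ 0 ∧ bd ≤ 0 then none
  else some (pd, bd)

-- A's inner for-loop over the stripped line
def scanDepth : List Char → Int → Int → Option (Int × Int)
  | [], pd, bd => some (pd, bd)
  | c :: rest, pd, bd =>
      match depthStep c pd bd with
      | none => none
      | some (pd', bd') => scanDepth rest pd' bd'

-- A's outer for-loop over range(start_line, min(start_line+30, len(lines)))
def findLoopA (lines : List String) (start_line : Int) : List Int → Int → Int → Int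
  | [], _, _ => start_line
  | i :: rest, pd, bd =>
      match PySem.List.pyGet? lines i with
      | none => 0   -- Python raises IndexError here; excluded by Pre_
      | some line =>
          match scanDepth (stripLineComment line.toList none) pd bd with
          | none => i
          | some (pd', bd') => findLoopA lines start_line rest pd' bd'

def find_semicolon_line (lines : List String) (start_line : Int) : Int :=
  findLoopA lines start_line
    (PySem.List.pyRange start_line (min (start_line + 30) (lines.length : Int)) 1) 0 0

-- ===== PORT B =====
-- B's fused inner loop: comment check, then the depth/semicolon step, then the string/escape
-- state update, all in one pass (skip = "previous char was a backslash inside a string").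
def scanFused : List Char → Option Char → Bool → Int → Int → Option (Int × Int)
  | [], _, _, pd, bd => some (pd, bd)
  | c :: rest, inStr, skip, pd, bd =>
      if inStr = none ∧ c = '/' ∧ rest.head? = some '/' then some (pd, bd)
      else
        match depthStep c pd bd with
        | none => none
        | some (pd', bd') =>
            if skip then scanFused rest inStr false pd' bd'
            else
              match inStr with
              | some q =>
                  if c = '\\' ∧ rest ≠ [] then scanFused rest (some q) true pd' bd'
                  else if c = q then scanFused rest none false pd' bd'
                  else scanFused rest (some q) false pd' bd'
              | none =>
                  if c = '"' ∨ c = '\'' then scanFused rest (some c) false pd' bd'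
                  else scanFused rest none false pd' bd'

def findLoopB (lines : List String) (start_line : Int) : List Int → Int → Int → Int
  | [], _, _ => start_line
  | i :: rest, pd, bd =>
      match PySem.List.pyGet? lines i with
      | none => start_line   -- Python raises IndexError here; excluded by Pre_
      | some line =>
          match scanFused line.toList none false pd bd with
          | none => i
          | some (pd', bd') => findLoopB lines start_line rest pd' bd'

def find_semicolon_line_alt (lines : List String) (start_line : Int) : Int :=
  findLoopB lines start_line
    (PySem.List.pyRange start_line (min (start_line + 30) (lines.length : Int)) 1) 0 0

-- ===== PRECONDITION & SPEC =====
-- A raises IndexError exactly when start_line < -len(lines) (the first loop index then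
-- under-runs Python's negative-index range); those inputs are excluded.
def Pre_find_semicolon_line (lines : List String) (start_line : Int) : Prop :=
  -(lines.length : Int) ≤ start_line
instance (lines : List String) (start_line : Int) : Decidable (Pre_find_semicolon_line lines start_line) := by unfold Pre_find_semicolon_line; infer_instance

def pvWitness_find_semicolon_line : List String × Int := (["a (;", "b); // x", "c ;"], 0)

def Spec_find_semicolon_line (lines : List String) (start_line : Int) (out : Int) : Prop := out = find_semicolon_line_alt lines start_line
instance (lines : List String) (start_line : Int) (out : Int) : Decidable (Spec_find_semicolon_line lines start_line out) := by unfold Spec_find_semicolon_line; infer_instance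

-- ===== CLAIM (what is proved, stated in full; the proofs are below) =====
def Claim_equal_find_semicolon_line : Prop := ∀ (lines : List String) (start_line : Int), Dom_find_semicolon_line lines start_line → Pre_find_semicolon_line lines start_line → Spec_find_semicolon_line lines start_line (find_semicolon_line lines start_line)

-- ===== LEMMAS AND PROOFS =====

-- Fusion lemma: B's single pass over a line equals A's depth scan of the stripped line.
theorem scanFused_eq_scanDepth_strip (n : Nat) :
    ∀ cs : List Char, cs.length ≤ n → ∀ q pd bd,
      scanFused cs q false pd bd = scanDepth (stripLineComment cs q) pd bd := by
  induction n with
  | zero =>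
      intro cs h q pd bd
      have : cs = [] := List.length_eq_zero_iff.mp (Nat.le_zero.mp h)
      subst this
      simp [scanFused, stripLineComment, scanDepth]
  | succ n ih =>
      intro cs h q pd bd
      match cs with
      | [] => simp [scanFused, stripLineComment, scanDepth]
      | c :: rest =>
        have hr : rest.length ≤ n := by simpa using h
        cases q with
        | some s =>
            by_cases hbs : c = '\\' ∧ rest ≠ []
            · obtain ⟨hc, hne⟩ := hbs
              subst hc
              match rest, hne with
              | r0 :: rest', _ =>
                have hr' : rest'.length ≤ n := by simp at hr; omega
                simp [scanFused, stripLineComment, scanDepth, depthStep, ih rest' hr']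
            · by_cases hc : c = s
              · subst hc
                simp [scanFused, stripLineComment, scanDepth, hbs, ih rest hr]
              · simp [scanFused, stripLineComment, scanDepth, hbs, hc, ih rest hr]
        | none =>
            by_cases hcm : c = '/' ∧ rest.head? = some '/'
            · obtain ⟨hc, h2⟩ := hcm
              subst hc
              simp [scanFused, stripLineComment, scanDepth, h2]
            · by_cases hquote : c = '"' ∨ c = '\''
              · simp [scanFused, stripLineComment, scanDepth, hcm, hquote, ih rest hr]
              · simp [scanFused, stripLineComment, scanDepth, hcm, hquote, ih rest hr]

theorem findLoopB_eq_findLoopA (lines : List String) (start_line : Int) :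
    ∀ (idxs : List Int), (∀ i ∈ idxs, PySem.List.pyGet? lines i ≠ none) →
      ∀ (pd bd : Int),
        findLoopB lines start_line idxs pd bd = findLoopA lines start_line idxs pd bd := by
  intro idxs
  induction idxs with
  | nil => intro _ pd bd; rfl
  | cons i rest ih =>
      intro hin pd bd
      simp only [findLoopA, findLoopB]
      cases hget : PySem.List.pyGet? lines i with
      | none => exact absurd hget (hin i (List.mem_cons_self))
      | some line =>
          dsimp only
          rw [scanFused_eq_scanDepth_strip line.toList.length line.toList (le_refl _)]
          cases scanDepth (stripLineComment line.toList none) pd bd with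
          | none => rfl
          | some pb =>
              obtain ⟨pd', bd'⟩ := pb
              dsimp only
              exact ih (fun j hj => hin j (List.mem_cons_of_mem i hj)) pd' bd'

-- ===== VERDICT (by name: the statement is the Claim_ definition above) =====
theorem find_semicolon_line_spec : Claim_equal_find_semicolon_line := by
  intro lines start_line _ hpre
  unfold Spec_find_semicolon_line find_semicolon_line find_semicolon_line_alt
  refine (findLoopB_eq_findLoopA lines start_line _ ?_ 0 0).symm
  intro i hi
  rw [PySem.List.mem_pyRange_one] at hi
  rw [Ne, PySem.List.pyGet?_eq_none_iff, not_not]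
  unfold Pre_find_semicolon_line at hpre
  constructor <;> omega
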